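-- pv_equiv track=rewrite | github.com/ziadalyH/AICI | ai-agent/config/prompt_templates.py | detect_compliance_question
-- ===== SOURCE A (Python) =====
-- def detect_compliance_question(query: str) -> bool:
--     """
--     Detect if a question is about compliance/regulations.
--
--     Args:
--         query: User's question
--
--     Returns:
--         True if question is about compliance
--     """
--     compliance_keywords = [
--         'comply', 'compliance', 'permitted development',
--         'allowed', 'legal', 'regulation', 'requirement',
--         'rule', 'restriction', 'permission'
--     ]
--     query_lower = query.lower()
--     return any(keyword in query_lower for keyword in compliance_keywords)
-- ===== SOURCE B (Python) =====
-- def detect_compliance_question(query: str) -> bool: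
--     """Single left-to-right scan: at each position of the lowercased query,
--     check whether any compliance keyword starts there."""
--     compliance_keywords = [
--         'comply', 'compliance', 'permitted development',
--         'allowed', 'legal', 'regulation', 'requirement',
--         'rule', 'restriction', 'permission'
--     ]
--     q = query.lower()
--     for i in range(len(q)):
--         for kw in compliance_keywords:
--             if q.startswith(kw, i):
--                 return True
--     return False
-- ===== Notes on version B (the rewrite author's own statement) =====
-- stated objective: alternative
-- what changed: Replaced the keyword-major loop of full substring searches ('kw in q' for each keyword) by one position-major left-to-right scan of the lowercased query that checks at each index whether some keyword starts there.
import Mathlib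
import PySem

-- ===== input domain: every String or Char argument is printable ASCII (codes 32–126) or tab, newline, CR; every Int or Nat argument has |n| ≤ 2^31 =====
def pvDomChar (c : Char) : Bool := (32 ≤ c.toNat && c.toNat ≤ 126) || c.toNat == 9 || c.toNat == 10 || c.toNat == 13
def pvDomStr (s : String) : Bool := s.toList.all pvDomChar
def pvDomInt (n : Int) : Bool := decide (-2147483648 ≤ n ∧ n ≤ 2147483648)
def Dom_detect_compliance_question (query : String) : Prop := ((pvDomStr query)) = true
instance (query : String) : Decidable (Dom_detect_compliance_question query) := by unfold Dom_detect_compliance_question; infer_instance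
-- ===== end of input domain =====

-- B: same keyword test, but one position-major scan of the lowercased query instead of a per-keyword substring search (alternative decomposition; return value only).
-- ===== PORT A =====
def pvKeywords_A : List String :=
  ["comply", "compliance", "permitted development",
   "allowed", "legal", "regulation", "requirement",
   "rule", "restriction", "permission"]

def detect_compliance_question (query : String) : Bool :=
  let query_lower := PySem.Str.lower query
  pvKeywords_A.any (fun keyword => PySem.Str.isIn keyword query_lower)

-- ===== PORT B =====
def pvKeywords_B : List String :=
  ["comply", "compliance", "permitted development",
   "allowed", "legal", "regulation", "requirement",
   "rule", "restriction", "permission"]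

-- the position loop: at each suffix of the lowered query, does some keyword start here?
def pvScan_B (l : List Char) : Bool :=
  match l with
  | [] => false
  | _ :: t =>
    if pvKeywords_B.any (fun kw => PySem.Chars.startswith l kw.toList) then true
    else pvScan_B t

def detect_compliance_question_alt (query : String) : Bool :=
  pvScan_B (PySem.Str.lower query).toList

-- ===== PRECONDITION & SPEC =====
def Spec_detect_compliance_question (query : String) (out : Bool) : Prop := out = detect_compliance_question_alt query
instance (query : String) (out : Bool) : Decidable (Spec_detect_compliance_question query out) := by unfold Spec_detect_compliance_question; infer_instance

-- ===== CLAIM (what is proved, stated in full; the proofs are below) =====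
def Claim_equal_detect_compliance_question : Prop := ∀ (query : String), Dom_detect_compliance_question query → Spec_detect_compliance_question query (detect_compliance_question query)

-- ===== LEMMAS AND PROOFS =====

-- ===== VERDICT (by name: the statement is the Claim_ definition above) =====
lemma pvScan_iff (l : List Char) :
    pvScan_B l = true ↔ ∃ kw ∈ pvKeywords_B, kw.toList <:+: l := by
  induction l with
  | nil =>
    simp [pvScan_B]
    decide
  | cons c t ih =>
    constructor
    · intro h
      simp only [pvScan_B] at h
      split_ifs at h with hpre
      · rcases List.any_eq_true.mp hpre with ⟨kw, hkw, hsw⟩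
        exact ⟨kw, hkw, ((PySem.Chars.startswith_iff _ _).mp hsw).isInfix⟩
      · rcases ih.mp h with ⟨kw, hkw, hinf⟩
        exact ⟨kw, hkw, hinf.trans (List.suffix_cons c t).isInfix⟩
    · rintro ⟨kw, hkw, hinf⟩
      rcases (List.infix_cons_iff).mp hinf with hp | hi
      · simp only [pvScan_B]
        rw [if_pos (List.any_eq_true.mpr ⟨kw, hkw, (PySem.Chars.startswith_iff _ _).mpr hp⟩)]
      · simp only [pvScan_B]
        split_ifs with hpre
        · rfl
        · exact ih.mpr ⟨kw, hkw, hi⟩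

theorem detect_compliance_question_spec : Claim_equal_detect_compliance_question := by
  intro query _
  unfold Spec_detect_compliance_question detect_compliance_question detect_compliance_question_alt
  have hkw : pvKeywords_A = pvKeywords_B := rfl
  rw [Bool.eq_iff_iff, pvScan_iff]
  simp only [List.any_eq_true, PySem.Str.isIn_iff_infix, hkw]
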